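-- pv_equiv track=rewrite | github.com/Lilyy200/ProjetSUC | V2/pattern_finder.py | _find_densest_zone_1D
-- ===== SOURCE A (Python) =====
-- def _find_densest_zone_1D(values, zone_size) -> int:
--     start = min(values)
--     end = max(values)
--     hist = [0] * (end - start + 1)
--
--     if len(hist) <= zone_size:
--         blank = zone_size - len(hist)
--         return start - blank // 2
--
--     for v in values:
--         hist[v - start] += 1
--
--     m = 0
--     i = -1
--
--     for j in range(len(hist) - zone_size + 1):
--         s = sum(hist[j:j+zone_size])
--
--         if s > m:
--             m = s
--             i = j
--
--     return start + i
-- ===== SOURCE B (Python) =====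
-- def _find_densest_zone_1D(values, zone_size) -> int:
--     start = min(values)
--     end = max(values)
--     width = end - start + 1
--
--     if width <= zone_size:
--         return start - (zone_size - width) // 2
--
--     counts = {}
--     for v in values:
--         counts[v] = counts.get(v, 0) + 1
--
--     s = 0
--     for k in range(zone_size):
--         s += counts.get(start + k, 0)
--
--     best_s = s
--     best_j = 0
--     for j in range(1, width - zone_size + 1):
--         s += counts.get(start + j + zone_size - 1, 0) - counts.get(start + j - 1, 0)
--         if s > best_s:
--             best_s = s
--             best_j = j
--
--     return start + best_j
-- ===== Notes on version B (the rewrite author's own statement) =====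
-- stated objective: faster
-- what changed: Replaces A's histogram list with per-window re-summation (sum(hist[j:j+zone_size]) recomputed for every window position) by a counting dict and a sliding-window running sum updated by adding the entering endpoint and removing the leaving one.
-- outside the precondition, e.g. on _find_densest_zone_1D([0], 0): A returns -1, B returns 0; on _find_densest_zone_1D([], 1): A raises ValueError, B raises ValueError
import Mathlib
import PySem

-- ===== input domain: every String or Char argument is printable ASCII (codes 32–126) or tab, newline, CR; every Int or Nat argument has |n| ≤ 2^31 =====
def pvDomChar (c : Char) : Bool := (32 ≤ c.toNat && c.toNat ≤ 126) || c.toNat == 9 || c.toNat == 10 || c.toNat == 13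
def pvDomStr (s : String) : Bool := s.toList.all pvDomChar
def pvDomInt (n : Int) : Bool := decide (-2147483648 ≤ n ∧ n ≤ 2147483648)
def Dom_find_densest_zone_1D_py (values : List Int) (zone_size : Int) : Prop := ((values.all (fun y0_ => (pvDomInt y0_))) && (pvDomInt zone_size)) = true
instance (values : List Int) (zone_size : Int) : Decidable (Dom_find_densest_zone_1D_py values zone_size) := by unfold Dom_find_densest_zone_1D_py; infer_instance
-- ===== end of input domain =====

-- B replaces A's per-window re-summation (sum(hist[j:j+zone_size]) for every window) by a
-- sliding-window running sum over a counting dict, updated by adding/removing the endpoints.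

-- ===== PORT A =====
def find_densest_zone_1D_py (values : List Int) (zone_size : Int) : Int :=
  match PySem.List.min? values (fun x => x), PySem.List.max? values (fun x => x) with
  | some start, some stop =>
    let hist : List Int := List.replicate (stop - start + 1).toNat 0
    if (hist.length : Int) ≤ zone_size then
      let blank := zone_size - (hist.length : Int)
      start - PySem.Int.floordiv blank 2
    else
      -- 'hist[v - start] += 1': v - start ≥ 0 always (start = min values), so .toNat indexing is exact
      let hist := values.foldl (fun h v => h.set (v - start).toNat (h.getD (v - start).toNat 0 + 1)) hist
      let res := (PySem.List.pyRange 0 ((hist.length : Int) - zone_size + 1) 1).foldl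
        (fun (mi : Int × Int) j =>
          let s := (PySem.List.slice hist (some j) (some (j + zone_size))).sum
          if s > mi.1 then (s, j) else mi) (0, -1)
      start + res.2
  | _, _ => 0  -- unreachable under Pre_ (values ≠ []); Python raises ValueError on min([])

-- ===== PORT B =====
def find_densest_zone_1D_py_alt (values : List Int) (zone_size : Int) : Int :=
  match PySem.List.min? values (fun x => x) with
  | none => 0  -- unreachable under Pre_ (values ≠ []); Python raises ValueError on min([])
  | some start =>
    match PySem.List.max? values (fun x => x) with
    | none => 0
    | some stop =>
        let width := stop - start + 1
        if width ≤ zone_size then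
          start - PySem.Int.floordiv (zone_size - width) 2
        else
          let counts := values.foldl (fun (d : PySem.Dict Int Int) v => d.insert v (d.getD v 0 + 1)) PySem.Dict.empty
          let s := (PySem.List.pyRange 0 zone_size 1).foldl (fun s k => s + counts.getD (start + k) 0) 0
          let res := (PySem.List.pyRange 1 (width - zone_size + 1) 1).foldl
            (fun (st : Int × Int × Int) j =>
              let s := st.1 + counts.getD (start + j + zone_size - 1) 0 - counts.getD (start + j - 1) 0
              if s > st.2.1 then (s, s, j) else (s, st.2.1, st.2.2)) (s, s, 0)
          start + res.2.2

-- ===== PRECONDITION & SPEC =====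
-- Pre_ excludes the empty list, on which A raises ValueError (min of empty sequence), and
-- non-positive zone_size, outside the task's natural domain, where A returns the leftover
-- sentinel start - 1 (i = -1 survives because every empty-slice window sum is 0).
def Pre_find_densest_zone_1D_py (values : List Int) (zone_size : Int) : Prop :=
  values ≠ [] ∧ 1 ≤ zone_size
instance (values : List Int) (zone_size : Int) : Decidable (Pre_find_densest_zone_1D_py values zone_size) := by unfold Pre_find_densest_zone_1D_py; infer_instance
def pvWitness_find_densest_zone_1D_py : List Int × Int := ([0, 2, 2, 5], 2)

def Spec_find_densest_zone_1D_py (values : List Int) (zone_size : Int) (out : Int) : Prop := out = find_densest_zone_1D_py_alt values zone_size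
instance (values : List Int) (zone_size : Int) (out : Int) : Decidable (Spec_find_densest_zone_1D_py values zone_size out) := by unfold Spec_find_densest_zone_1D_py; infer_instance

-- ===== CLAIM (what is proved, stated in full; the proofs are below) =====
def Claim_equal_find_densest_zone_1D_py : Prop := ∀ (values : List Int) (zone_size : Int), Dom_find_densest_zone_1D_py values zone_size → Pre_find_densest_zone_1D_py values zone_size → Spec_find_densest_zone_1D_py values zone_size (find_densest_zone_1D_py values zone_size)

-- ===== LEMMAS AND PROOFS =====

-- window sum: number of values falling in [lo, lo + z)
def pvW (values : List Int) (z lo : Int) : Int :=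
  ((List.range z.toNat).map (fun k : Nat => (values.count (lo + (k : Int)) : Int))).sum

-- the histogram-filling loop preserves length
theorem pv_fill_len (start : Int) (vs : List Int) (h : List Int) :
    (vs.foldl (fun h v => h.set (v - start).toNat (h.getD (v - start).toNat 0 + 1)) h).length = h.length := by
  induction vs generalizing h with
  | nil => rfl
  | cons v vs ih => rw [List.foldl_cons, ih, List.length_set]

-- the filled histogram counts occurrences
theorem pv_fill_getD (start : Int) (vs : List Int) (h : List Int)
    (hv : ∀ v ∈ vs, start ≤ v ∧ (v - start).toNat < h.length) (k : Nat) (hk : k < h.length) :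
    (vs.foldl (fun h v => h.set (v - start).toNat (h.getD (v - start).toNat 0 + 1)) h).getD k 0
      = h.getD k 0 + (vs.count (start + (k : Int)) : Int) := by
  induction vs generalizing h with
  | nil => simp
  | cons v vs ih =>
    have hvh := hv v (by simp)
    have hrest : ∀ w ∈ vs, start ≤ w ∧ (w - start).toNat < (h.set (v - start).toNat (h.getD (v - start).toNat 0 + 1)).length := by
      intro w hw; simpa using hv w (by simp [hw])
    rw [List.foldl_cons, ih _ hrest (by simpa using hk)]
    have hargs : (v = start + (k : Int)) ↔ ((v - start).toNat = k) := by omega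
    rw [List.count_cons]
    by_cases hvk : (v - start).toNat = k
    · have hv' : v = start + (k : Int) := hargs.mpr hvk
      simp [List.getD, hk, hv']
      omega
    · have hv' : ¬ (v = start + (k : Int)) := fun h' => hvk (hargs.mp h')
      simp [List.getD, hvk, hv']

-- a drop/take of a list, written as a map over indices
theorem pv_slice_eq_map (xs : List Int) (a n : Nat) (hle : a + n ≤ xs.length) :
    (xs.drop a).take n = (List.range n).map (fun k => xs.getD (a + k) 0) := by
  apply List.ext_getElem
  · simp; omega
  · intro i h1 h2
    simp only [List.getElem_take, List.getElem_drop, List.getElem_map, List.getElem_range]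
    rw [List.getD_eq_getElem _ _ (by simp at h1 ⊢; omega)]

theorem pv_shift (c : Int → Int) (lo : Int) (n : Nat) :
    ((List.range n).map (fun k : Nat => c (lo + 1 + (k : Int)))).sum
      = ((List.range n).map (fun k : Nat => c (lo + (k : Int)))).sum + c (lo + (n : Int)) - c lo := by
  induction n with
  | zero => simp
  | succ m ih =>
    rw [List.range_succ, List.map_append, List.map_append]
    simp only [List.map_cons, List.map_nil, List.sum_append, List.sum_cons, List.sum_nil]
    rw [ih, show lo + 1 + (m : Int) = lo + ((m + 1 : Nat) : Int) from by push_cast; ring]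
    push_cast
    ring

-- the telescoping property of window sums
theorem pvW_succ (values : List Int) (z lo : Int) (hz : 1 ≤ z) :
    pvW values z (lo + 1) = pvW values z lo + (values.count (lo + z) : Int) - (values.count lo : Int) := by
  unfold pvW
  rw [pv_shift (fun t => (values.count t : Int)) lo z.toNat,
    show lo + (z.toNat : Int) = lo + z from by omega]

-- the first window contains the minimum, so its sum is positive
theorem pvW_pos (values : List Int) (z start : Int) (hz : 1 ≤ z) (hmem : start ∈ values) :
    0 < pvW values z start := by
  unfold pvW
  have h0 : (0 : Nat) ∈ List.range z.toNat := by simp; omega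
  have hterm : ((values.count (start + ((0 : Nat) : Int)) : Int)) ∈
      (List.range z.toNat).map (fun k : Nat => (values.count (start + (k : Int)) : Int)) :=
    List.mem_map_of_mem h0
  have hle : ((values.count (start + ((0 : Nat) : Int)) : Int)) ≤
      ((List.range z.toNat).map (fun k : Nat => (values.count (start + (k : Int)) : Int))).sum :=
    List.single_le_sum (by intro x hx; simp at hx; obtain ⟨k, _, hk⟩ := hx; omega) _ hterm
  have hc : 0 < values.count start := List.count_pos_iff.mpr hmem
  simp only [Nat.cast_zero, add_zero] at hle
  omega

-- generic loop comparison: A's argmax-of-window-sums loop versus B's sliding-sum loop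
theorem pv_main_loop (cplus cminus g : Int → Int)
    (hg : ∀ j, g j = g (j - 1) + cplus j - cminus j) :
    ∀ (fuel : Nat) (a N m i : Int), (N - a).toNat = fuel →
    ((PySem.List.pyRange a N 1).foldl (fun (mi : Int × Int) j => if g j > mi.1 then (g j, j) else mi) (m, i)).2
      = ((PySem.List.pyRange a N 1).foldl (fun (st : Int × Int × Int) j =>
            let s := st.1 + cplus j - cminus j;
            if s > st.2.1 then (s, s, j) else (s, st.2.1, st.2.2)) (g (a - 1), m, i)).2.2 := by
  intro fuel
  induction fuel with
  | zero =>
    intro a N m i hf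
    rw [PySem.List.pyRange_one_eq_nil (by omega)]
    rfl
  | succ f ih =>
    intro a N m i hf
    rw [PySem.List.pyRange_one_cons (by omega)]
    simp only [List.foldl_cons]
    rw [(hg a).symm]
    have e1 : a + 1 - 1 = a := by ring
    by_cases hc : g a > m
    · rw [if_pos hc, if_pos hc]
      have h2 := ih (a + 1) N (g a) a (by omega)
      rw [e1] at h2
      exact h2
    · rw [if_neg hc, if_neg hc]
      have h2 := ih (a + 1) N m i (by omega)
      rw [e1] at h2
      exact h2

-- a slice-sum of the filled histogram is the window sum
theorem pv_window_sum (hist values : List Int) (start z j : Int) (hz : 0 ≤ z) (hj : 0 ≤ j)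
    (hle : j + z ≤ (hist.length : Int))
    (hgetD : ∀ k : Nat, k < hist.length → hist.getD k 0 = (values.count (start + (k : Int)) : Int)) :
    (PySem.List.slice hist (some j) (some (j + z))).sum = pvW values z (start + j) := by
  rw [PySem.List.slice_toNat _ hj (by omega),
    show (j + z).toNat - j.toNat = z.toNat from by omega,
    pv_slice_eq_map hist j.toNat z.toNat (by omega)]
  unfold pvW
  congr 1
  apply List.map_congr_left
  intro k hk
  simp only [List.mem_range] at hk
  rw [hgetD (j.toNat + k) (by omega)]
  congr 2
  push_cast
  omega

-- B's initial running sum is the first window sum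
theorem pv_init_sum (values : List Int) (z start : Int) :
    ((PySem.List.pyRange 0 z 1).foldl (fun s k => s + (values.count (start + k) : Int)) 0)
      = pvW values z start := by
  rw [PySem.List.foldl_add, PySem.List.pyRange_one, List.map_map]
  unfold pvW
  simp [Function.comp_def]

-- ===== VERDICT (by name: the statement is the Claim_ definition above) =====
theorem find_densest_zone_1D_py_spec : Claim_equal_find_densest_zone_1D_py := by
  intro values zone_size hdom hpre
  obtain ⟨hne, hz⟩ := hpre
  unfold Spec_find_densest_zone_1D_py
  obtain ⟨start, hmin⟩ : ∃ s, PySem.List.min? values (fun x => x) = some s := by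
    cases h : PySem.List.min? values (fun x => x) with
    | none => exact absurd ((PySem.List.min?_eq_none_iff values (fun x => x)).mp h) hne
    | some s => exact ⟨s, rfl⟩
  obtain ⟨stop, hmax⟩ : ∃ s, PySem.List.max? values (fun x => x) = some s := by
    cases h : PySem.List.max? values (fun x => x) with
    | none => exact absurd ((PySem.List.max?_eq_none_iff values (fun x => x)).mp h) hne
    | some s => exact ⟨s, rfl⟩
  have hlow : ∀ v ∈ values, start ≤ v := fun v hv => PySem.List.min?_isMin hmin v hv
  have hhigh : ∀ v ∈ values, v ≤ stop := fun v hv => PySem.List.max?_isMax hmax v hv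
  have hmem : start ∈ values := PySem.List.min?_mem hmin
  have hss : start ≤ stop := hhigh start hmem
  have hcast : (((stop - start + 1).toNat : Nat) : Int) = stop - start + 1 := by omega
  rw [find_densest_zone_1D_py, find_densest_zone_1D_py_alt, hmin, hmax]
  simp only [List.length_replicate, hcast, pv_fill_len]
  by_cases hwz : stop - start + 1 ≤ zone_size
  · rw [if_pos hwz, if_pos hwz]
  · rw [if_neg hwz, if_neg hwz]
    set hist2 : List Int := values.foldl (fun h v => h.set (v - start).toNat (h.getD (v - start).toNat 0 + 1))
      (List.replicate (stop - start + 1).toNat (0 : Int)) with hh2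
    have hlen : hist2.length = (stop - start + 1).toNat := by
      rw [hh2, pv_fill_len, List.length_replicate]
    have hgetD2 : ∀ k : Nat, k < hist2.length → hist2.getD k 0 = (values.count (start + (k : Int)) : Int) := by
      intro k hk
      rw [hh2, pv_fill_getD start values _ (by
        intro v hv
        have h1 := hlow v hv
        have h2 := hhigh v hv
        refine ⟨h1, ?_⟩
        simp only [List.length_replicate]
        omega) k (by rw [hlen] at hk; simpa using hk)]
      simp
    -- rewrite dict lookups in B into counts
    simp only [PySem.Dict.foldl_insert_getD_add_one_eq_counter, PySem.Dict.getD_counter]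
    -- rewrite A's slice sums into window sums
    have hcongr := PySem.List.foldl_congr_mem'
      (l := PySem.List.pyRange 0 (stop - start + 1 - zone_size + 1) 1)
      (f := fun (mi : Int × Int) j =>
        if (PySem.List.slice hist2 (some j) (some (j + zone_size))).sum > mi.1
        then ((PySem.List.slice hist2 (some j) (some (j + zone_size))).sum, j) else mi)
      (g := fun (mi : Int × Int) j =>
        if pvW values zone_size (start + j) > mi.1 then (pvW values zone_size (start + j), j) else mi)
      (init := ((0 : Int), (-1 : Int)))
      (by
        intro j hj acc
        rw [PySem.List.mem_pyRange_one] at hj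
        simp only
        rw [pv_window_sum hist2 values start zone_size j (by omega) (by omega)
          (by rw [hlen]; omega) hgetD2])
    rw [hcongr]
    -- B's initial sum is the first window sum
    rw [pv_init_sum values zone_size start]
    -- peel off j = 0 from A's loop
    rw [PySem.List.pyRange_one_cons (show (0 : Int) < stop - start + 1 - zone_size + 1 from by omega)]
    simp only [List.foldl_cons]
    have hpos : pvW values zone_size (start + 0) > 0 := by
      rw [add_zero]; exact pvW_pos values zone_size start hz hmem
    rw [if_pos hpos]
    -- the generic loop comparison, with g j = window sum at offset j
    have hg : ∀ j : Int, pvW values zone_size (start + j)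
        = pvW values zone_size (start + (j - 1)) + (values.count (start + j + zone_size - 1) : Int)
          - (values.count (start + j - 1) : Int) := by
      intro j
      have h := pvW_succ values zone_size (start + j - 1) hz
      rw [show start + j - 1 + 1 = start + j from by ring,
        show start + j - 1 + zone_size = start + j + zone_size - 1 from by ring,
        show start + j - 1 = start + (j - 1) from by ring] at h
      rw [h, show start + (j - 1) = start + j - 1 from by ring]
    have hmain := pv_main_loop (fun j => (values.count (start + j + zone_size - 1) : Int))
      (fun j => (values.count (start + j - 1) : Int))
      (fun j => pvW values zone_size (start + j))
      (by intro j; exact hg j)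
      (stop - start + 1 - zone_size + 1 - 1).toNat 1 (stop - start + 1 - zone_size + 1)
      (pvW values zone_size (start + 0)) 0 (by omega)
    simp only [show (1 : Int) - 1 = 0 from by ring] at hmain
    rw [add_zero] at hmain
    rw [add_zero, show (0 : Int) + 1 = 1 from by ring, hmain]
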